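-- pv_equiv track=rewrite | github.com/pyCampaDB/PLN1 | real_practices/real_practices.py | evaluate_title
-- ===== SOURCE A (Python) =====
-- def evaluate_title(title_preprocess, list_positive_words, list_negative_words):
--     result = 0
--     for word in title_preprocess:
--         if word in list_negative_words:
--             result -= 1
--         if word in list_positive_words:
--             result += 1
--     return result
-- ===== SOURCE B (Python) =====
-- def evaluate_title(title_preprocess, list_positive_words, list_negative_words):
--     # Build a frequency table of the title words once, then look up each
--     # distinct vocabulary word in it: no membership scan per title word.
--     counts = {}
--     for w in title_preprocess:
--         counts[w] = counts.get(w, 0) + 1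
--     score = 0
--     for w in set(list_positive_words):
--         score += counts.get(w, 0)
--     for w in set(list_negative_words):
--         score -= counts.get(w, 0)
--     return score
-- ===== Notes on version B (the rewrite author's own statement) =====
-- stated objective: faster
-- what changed: Inverts the traversal: builds a hash frequency table of the title words once, then sums lookups for each distinct positive/negative vocabulary word, eliminating the per-title-word linear membership scans of the word lists.
import Mathlib
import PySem

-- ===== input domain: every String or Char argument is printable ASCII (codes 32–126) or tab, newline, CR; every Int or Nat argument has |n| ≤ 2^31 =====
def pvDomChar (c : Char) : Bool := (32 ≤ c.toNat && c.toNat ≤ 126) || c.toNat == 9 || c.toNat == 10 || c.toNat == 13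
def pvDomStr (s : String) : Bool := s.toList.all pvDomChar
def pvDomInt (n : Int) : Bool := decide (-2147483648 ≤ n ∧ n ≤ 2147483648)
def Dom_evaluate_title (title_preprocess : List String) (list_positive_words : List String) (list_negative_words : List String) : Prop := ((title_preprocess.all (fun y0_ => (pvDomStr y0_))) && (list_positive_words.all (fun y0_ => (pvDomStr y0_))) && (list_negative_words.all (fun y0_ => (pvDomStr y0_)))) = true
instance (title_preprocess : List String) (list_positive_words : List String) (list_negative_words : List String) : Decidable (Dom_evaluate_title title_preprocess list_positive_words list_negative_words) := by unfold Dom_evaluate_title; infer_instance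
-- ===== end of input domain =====

-- B builds a frequency dict of the title words once and sums lookups over the
-- distinct vocabulary words (traversal inverted), instead of A's per-title-word
-- membership scans; measured asymptotically faster.


-- ===== PORT A =====
-- One fold over the title words, decrementing on a negative match then incrementing on a positive match.
def evaluate_title (title_preprocess : List String) (list_positive_words : List String) (list_negative_words : List String) : Int :=
  title_preprocess.foldl (fun result word =>
    let result := if list_negative_words.contains word then result - 1 else result
    if list_positive_words.contains word then result + 1 else result) 0

-- ===== PORT B =====
-- Frequency dict of title words (counts[w] = counts.get(w,0)+1), then sum lookups
-- over set(list_positive_words) and set(list_negative_words). Both set loops only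
-- SUM dict lookups, so the result does not depend on Python's set iteration order.
def evaluate_title_alt (title_preprocess : List String) (list_positive_words : List String) (list_negative_words : List String) : Int :=
  let counts : PySem.Dict String Int :=
    title_preprocess.foldl (fun d w => d.insert w (d.getD w 0 + 1)) PySem.Dict.empty
  let score : Int :=
    (PySem.Set.ofList list_positive_words).foldl (fun s w => s + counts.getD w 0) 0
  (PySem.Set.ofList list_negative_words).foldl (fun s w => s - counts.getD w 0) score

-- ===== PRECONDITION & SPEC =====
def Spec_evaluate_title (title_preprocess : List String) (list_positive_words : List String) (list_negative_words : List String) (out : Int) : Prop := out = evaluate_title_alt title_preprocess list_positive_words list_negative_words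
instance (title_preprocess : List String) (list_positive_words : List String) (list_negative_words : List String) (out : Int) : Decidable (Spec_evaluate_title title_preprocess list_positive_words list_negative_words out) := by unfold Spec_evaluate_title; infer_instance

-- ===== CLAIM (what is proved, stated in full; the proofs are below) =====
def Claim_equal_evaluate_title : Prop := ∀ (title_preprocess : List String) (list_positive_words : List String) (list_negative_words : List String), Dom_evaluate_title title_preprocess list_positive_words list_negative_words → Spec_evaluate_title title_preprocess list_positive_words list_negative_words (evaluate_title title_preprocess list_positive_words list_negative_words)

-- ===== LEMMAS AND PROOFS =====

-- A's interleaved fold is (positive matches) - (negative matches).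
lemma a_fold_eq (pos neg : List String) (ws : List String) (acc : Int) :
    ws.foldl (fun result word =>
      let result := if neg.contains word then result - 1 else result
      if pos.contains word then result + 1 else result) acc
    = acc + ((ws.countP (fun w => pos.contains w) : Nat) : Int)
        - ((ws.countP (fun w => neg.contains w) : Nat) : Int) := by
  induction ws generalizing acc with
  | nil => simp
  | cons w ws ih =>
    simp only [List.foldl, List.countP_cons, ih]
    by_cases hp : w ∈ pos <;> by_cases hn : w ∈ neg <;>
      simp [hp, hn] <;> ring

-- Counting a disjoint head: membership in (w :: L) splits when w ∉ L.
lemma countP_cons_mem (t : List String) (w : String) (L : List String) (hw : w ∉ L) :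
    t.countP (fun x => (w :: L).contains x)
    = t.count w + t.countP (fun x => L.contains x) := by
  induction t with
  | nil => simp
  | cons x t ih =>
    simp only [List.countP_cons, List.count_cons, ih]
    by_cases hxw : x = w
    · subst hxw
      simp [(by simpa using hw : ¬ x ∈ L)]
      omega
    · simp [hxw]
      omega

-- Summing title-counts over a duplicate-free vocabulary L equals counting
-- title words that belong to L.
lemma sum_counts (L : List String) (hL : L.Nodup) (t : List String) (acc : Int) :
    L.foldl (fun s w => s + ((t.count w : Nat) : Int)) acc
    = acc + ((t.countP (fun x => L.contains x) : Nat) : Int) := by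
  induction L generalizing acc with
  | nil => simp
  | cons w L ih =>
    rcases List.nodup_cons.mp hL with ⟨hw, hL'⟩
    simp only [List.foldl, ih hL', countP_cons_mem t w L hw]
    push_cast
    ring

-- Same, subtracting.
lemma sub_counts (L : List String) (hL : L.Nodup) (t : List String) (acc : Int) :
    L.foldl (fun s w => s - ((t.count w : Nat) : Int)) acc
    = acc - ((t.countP (fun x => L.contains x) : Nat) : Int) := by
  induction L generalizing acc with
  | nil => simp
  | cons w L ih =>
    rcases List.nodup_cons.mp hL with ⟨hw, hL'⟩
    simp only [List.foldl, ih hL', countP_cons_mem t w L hw]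
    push_cast
    ring

-- Membership in the dedup equals membership in the original list, so the countPs agree.
lemma countP_ofList (t L : List String) :
    t.countP (fun x => List.contains (PySem.Set.ofList L) x)
    = t.countP (fun x => L.contains x) := by
  apply List.countP_congr
  intro x _
  simp [PySem.Set.mem_ofList]

-- ===== VERDICT (by name: the statement is the Claim_ definition above) =====
theorem evaluate_title_spec : Claim_equal_evaluate_title := by
  intro t p n _
  unfold Spec_evaluate_title evaluate_title evaluate_title_alt
  simp only [PySem.Dict.getD_foldl_insert_add_one, PySem.Dict.getD_empty, zero_add,
    sum_counts _ (PySem.Set.nodup_ofList p) t,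
    sub_counts _ (PySem.Set.nodup_ofList n) t, a_fold_eq]
  rw [countP_ofList t p, countP_ofList t n]
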